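-- pv_equiv track=rewrite | github.com/sebaschb/electrodunas | Datos_DB/scripts/instrumentations.py | generate_sets_readings
-- ===== SOURCE A (Python) =====
-- def generate_sets_readings(dataFinal):
--     dataReading = []
--     subdata = []
--     for data in dataFinal:
--         if 'set' in data[0].lower():
--             subdata = [data]
--             dataReading.append(subdata)
--         else:
--             subdata.append(data)
--
--     return dataReading
-- ===== SOURCE B (Python) =====
-- def generate_sets_readings(dataFinal):
--     # Two staged passes: find the marker indices, then slice between consecutive markers.
--     positions = [i for i, row in enumerate(dataFinal) if 'set' in row[0].lower()]
--     ends = positions[1:] + [len(dataFinal)]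
--     return [dataFinal[a:b] for a, b in zip(positions, ends)]
-- ===== Notes on version B (the rewrite author's own statement) =====
-- stated objective: alternative
-- what changed: B replaces A's single stateful scan with a mutable-aliased current sublist by two staged passes: enumerate the indices of the 'set' marker rows, then build each group as the slice of dataFinal between consecutive marker indices (last group runs to the end); rows before the first marker are dropped by construction.
import Mathlib
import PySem

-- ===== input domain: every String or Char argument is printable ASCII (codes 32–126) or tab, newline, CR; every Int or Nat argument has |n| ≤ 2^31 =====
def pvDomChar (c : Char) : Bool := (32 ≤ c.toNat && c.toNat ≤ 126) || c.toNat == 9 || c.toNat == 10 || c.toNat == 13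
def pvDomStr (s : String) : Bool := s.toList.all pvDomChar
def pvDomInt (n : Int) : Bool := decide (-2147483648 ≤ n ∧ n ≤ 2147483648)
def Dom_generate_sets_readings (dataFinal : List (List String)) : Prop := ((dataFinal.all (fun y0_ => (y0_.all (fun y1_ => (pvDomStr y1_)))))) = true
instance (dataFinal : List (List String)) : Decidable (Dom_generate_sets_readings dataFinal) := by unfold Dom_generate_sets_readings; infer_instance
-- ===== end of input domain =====

-- B groups by two staged passes (marker indices, then slices between consecutive markers)
-- instead of A's stateful scan; equivalent on inputs whose rows are all nonempty (A raises otherwise).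


-- 'set' in data[0].lower()  (row nonempty by Pre_; headD only used under that)
def pvMarker (row : List String) : Bool :=
  PySem.Str.isIn "set" (PySem.Str.lower (row.headD ""))

-- ===== PORT A =====
-- state = (finished-or-aliased groups so far, the live subdata list, whether subdata
-- is aliased into dataReading); models Python's in-place mutation of the appended list.
def gsrStep (st : List (List (List String)) × List (List String) × Bool)
    (row : List String) : List (List (List String)) × List (List String) × Bool :=
  if pvMarker row then (st.1 ++ (if st.2.2 then [st.2.1] else []), [row], true)
  else (st.1, st.2.1 ++ [row], st.2.2)

def generate_sets_readings (dataFinal : List (List String)) : List (List (List String)) :=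
  let st := dataFinal.foldl gsrStep ([], [], false)
  st.1 ++ (if st.2.2 then [st.2.1] else [])

-- ===== PORT B =====
-- positions = [i for i, row in enumerate(dataFinal) if marker]; ends = positions[1:]+[len];
-- return [dataFinal[a:b] for a, b in zip(positions, ends)]
def gsrAltPositions (dataFinal : List (List String)) : List Int :=
  ((PySem.List.enumerate dataFinal).filter (fun p => pvMarker p.2)).map (·.1)

def gsrAltEnds (dataFinal : List (List String)) : List Int :=
  (gsrAltPositions dataFinal).drop 1 ++ [(dataFinal.length : Int)]

def generate_sets_readings_alt (dataFinal : List (List String)) : List (List (List String)) :=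
  ((gsrAltPositions dataFinal).zip (gsrAltEnds dataFinal)).map
    (fun ab => PySem.List.slice dataFinal (some ab.1) (some ab.2))

-- ===== PRECONDITION & SPEC =====
-- Pre_ excludes only rows that are empty lists: there A raises IndexError on data[0].
def Pre_generate_sets_readings (dataFinal : List (List String)) : Prop :=
  (dataFinal.all (fun r => !r.isEmpty)) = true
instance (dataFinal : List (List String)) : Decidable (Pre_generate_sets_readings dataFinal) := by unfold Pre_generate_sets_readings; infer_instance

def pvWitness_generate_sets_readings : List (List String) :=
  [["x", "0"], ["Set 1", "a"], ["b"], ["set 2"], ["c", "d"]]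

def Spec_generate_sets_readings (dataFinal : List (List String)) (out : List (List (List String))) : Prop := out = generate_sets_readings_alt dataFinal
instance (dataFinal : List (List String)) (out : List (List (List String))) : Decidable (Spec_generate_sets_readings dataFinal out) := by unfold Spec_generate_sets_readings; infer_instance

-- ===== CLAIM (what is proved, stated in full; the proofs are below) =====
def Claim_equal_generate_sets_readings : Prop := ∀ (dataFinal : List (List String)), Dom_generate_sets_readings dataFinal → Pre_generate_sets_readings dataFinal → Spec_generate_sets_readings dataFinal (generate_sets_readings dataFinal)

-- ===== LEMMAS AND PROOFS =====

-- reference decomposition: (groups starting at markers, rows preceding the first marker)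
def gsrGroups : List (List String) → List (List (List String)) × List (List String)
  | [] => ([], [])
  | x :: xs =>
    let p := gsrGroups xs
    if pvMarker x then ((x :: p.2) :: p.1, []) else (p.1, x :: p.2)

-- marker positions as Nat indices
def gsrPos : List (List String) → List Nat
  | [] => []
  | x :: xs =>
    if pvMarker x then 0 :: (gsrPos xs).map (· + 1) else (gsrPos xs).map (· + 1)

-- Nat-index slices between consecutive positions
def gsrSlices (l : List (List String)) (ps : List Nat) : List (List (List String)) :=
  (ps.zip (ps.drop 1 ++ [l.length])).map (fun p => (l.drop p.1).take (p.2 - p.1))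

theorem gsrA_char (l : List (List String)) :
    ∀ (done : List (List (List String))) (cur : List (List String)) (started : Bool),
    (let st := l.foldl gsrStep (done, cur, started)
     st.1 ++ (if st.2.2 then [st.2.1] else [])) =
    done ++ (if started then [cur ++ (gsrGroups l).2] else []) ++ (gsrGroups l).1 := by
  induction l with
  | nil => intro done cur started; cases started <;> simp [gsrGroups]
  | cons x xs ih =>
    intro done cur started
    simp only [List.foldl_cons, gsrStep, gsrGroups]
    by_cases hm : pvMarker x
    · simp only [hm, ih]
      cases started <;> simp
    · simp only [if_neg hm, ih]
      cases started <;> simp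

theorem gsr_prefix (l : List (List String)) :
    (gsrGroups l).2 = l.take ((gsrPos l).headD l.length) := by
  induction l with
  | nil => simp [gsrGroups, gsrPos]
  | cons x xs ih =>
    simp only [gsrGroups, gsrPos]
    by_cases hm : pvMarker x
    · simp [hm]
    · simp only [if_neg hm]
      cases h : gsrPos xs with
      | nil => simp [h, ih]
      | cons q r => simp [h, ih]

theorem gsrSlices_shift (x : List String) (l : List (List String)) (ps : List Nat) :
    gsrSlices (x :: l) (ps.map (· + 1)) = gsrSlices l ps := by
  unfold gsrSlices
  have h : (ps.map (· + 1)).drop 1 ++ [(x :: l).length] =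
      (ps.drop 1 ++ [l.length]).map (· + 1) := by
    simp
  rw [h, List.zip_map]
  simp [List.map_map, Function.comp, Nat.succ_sub_succ]

theorem gsrSlices_cons_zero (l : List (List String)) (ps : List Nat) :
    gsrSlices l (0 :: ps) = l.take (ps.headD l.length) :: gsrSlices l ps := by
  cases ps <;> simp [gsrSlices]

theorem gsr_slices_eq (l : List (List String)) :
    gsrSlices l (gsrPos l) = (gsrGroups l).1 := by
  induction l with
  | nil => simp [gsrSlices, gsrPos, gsrGroups]
  | cons x xs ih =>
    simp only [gsrPos, gsrGroups]
    by_cases hm : pvMarker x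
    · simp only [hm, if_pos]
      rw [gsrSlices_cons_zero, gsrSlices_shift, ih]
      have hpre := gsr_prefix xs
      cases h : gsrPos xs with
      | nil => simp [h, List.take_length] at hpre ⊢; simp [hpre]
      | cons q r => simp [h] at hpre ⊢; simp [hpre]
    · simp only [if_neg hm]
      rw [gsrSlices_shift, ih]

theorem gsr_positions (l : List (List String)) :
    ∀ (s : Int), ((PySem.List.enumerate l s).filter (fun p => pvMarker p.2)).map (·.1) =
      (gsrPos l).map (fun k : Nat => s + (k : Int)) := by
  induction l with
  | nil => intro s; simp [PySem.List.enumerate_nil, gsrPos]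
  | cons x xs ih =>
    intro s
    rw [PySem.List.enumerate_cons]
    simp only [gsrPos]
    by_cases hm : pvMarker x
    · rw [List.filter_cons_of_pos (by simpa using hm), if_pos hm]
      simp only [List.map_cons, ih (s + 1), List.map_map]
      refine congrArg₂ List.cons (by simp) ?_
      apply List.map_congr_left; intro k _
      simp only [Function.comp_apply]; push_cast; ring
    · rw [List.filter_cons_of_neg (by simpa using hm), if_neg hm]
      rw [ih (s + 1), List.map_map]
      apply List.map_congr_left; intro k _
      simp only [Function.comp_apply]; push_cast; ring

theorem gsrB_char (l : List (List String)) :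
    generate_sets_readings_alt l = gsrSlices l (gsrPos l) := by
  unfold generate_sets_readings_alt gsrAltEnds gsrAltPositions gsrSlices
  have hp : ((PySem.List.enumerate l).filter (fun p => pvMarker p.2)).map (·.1) =
      (gsrPos l).map (fun k : Nat => (k : Int)) := by
    have := gsr_positions l 0
    simpa only [zero_add] using this
  rw [hp]
  have he : ((gsrPos l).map (fun k : Nat => (k : Int))).drop 1 ++ [(l.length : Int)] =
      ((gsrPos l).drop 1 ++ [l.length]).map (fun k : Nat => (k : Int)) := by
    simp
  rw [he, List.zip_map]
  simp [List.map_map, Function.comp, PySem.List.slice_natCast]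

-- ===== VERDICT (by name: the statement is the Claim_ definition above) =====
theorem generate_sets_readings_spec : Claim_equal_generate_sets_readings := by
  intro dataFinal _ _
  unfold Spec_generate_sets_readings generate_sets_readings
  rw [gsrB_char, gsr_slices_eq]
  simpa using gsrA_char dataFinal [] [] false
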